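-- pv_equiv track=rewrite | github.com/FoxerLee/Leetcode | submission/python/0660.py | newInteger
-- ===== SOURCE A (Python) =====
-- def newInteger(n: int) -> int:
--     b = []
--     while True:
--         tmp = n // 9
--         y = n % 9
--         b += [y]
--         if tmp == 0:
--             break
--         n = tmp
--
--     b.reverse()
--     res = ""
--
--     for i in b:
--         res += str(i)
--
--     return int(res)
-- ===== SOURCE B (Python) =====
-- def newInteger(n: int) -> int:
--     res = 0
--     base = 1
--     while n != 0:
--         res += (n % 9) * base
--         base *= 10
--         n //= 9
--     return res
-- ===== Notes on version B (the rewrite author's own statement) =====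
-- stated objective: simpler
-- what changed: B accumulates the result arithmetically with a decimal place-value multiplier in one loop, instead of collecting digits into a list, reversing it, concatenating a string digit by digit and parsing it back with int().
import Mathlib
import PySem

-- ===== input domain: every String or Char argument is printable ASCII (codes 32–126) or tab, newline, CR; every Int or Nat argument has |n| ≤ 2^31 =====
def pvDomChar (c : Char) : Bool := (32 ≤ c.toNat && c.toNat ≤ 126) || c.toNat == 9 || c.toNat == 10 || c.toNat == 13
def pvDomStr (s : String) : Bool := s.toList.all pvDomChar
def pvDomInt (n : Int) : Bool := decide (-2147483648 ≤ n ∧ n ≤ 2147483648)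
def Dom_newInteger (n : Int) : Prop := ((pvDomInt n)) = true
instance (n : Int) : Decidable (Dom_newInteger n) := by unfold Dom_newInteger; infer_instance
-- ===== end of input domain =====

-- B replaces A's digit-list + reverse + string-concatenation + int() pipeline by a single
-- arithmetic accumulation with a place-value multiplier (objective: simpler).

-- ===== PORT A =====
-- A's `while True` digit-collection loop; fuel-driven structural recursion (fuel n.natAbs+1 is
-- ample for every n ≥ 0, the inputs Pre_ admits; on negative n Python A never terminates).
def newIntegerDigits : Nat → Int → List Int
  | 0, _ => []
  | fuel + 1, n =>
    let tmp := PySem.Int.floordiv n 9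
    let y := PySem.Int.mod n 9
    if tmp = 0 then [y] else y :: newIntegerDigits fuel tmp

def newInteger (n : Int) : Int :=
  let b := (newIntegerDigits (n.natAbs + 1) n).reverse
  -- res = ""; for i in b: res += str(i)   (strings carried as List Char, per PySem convention)
  let res : List Char := b.foldl (fun s i => s ++ PySem.Int.toChars i) []
  -- int(res): ofChars? never returns none on the digit strings this loop builds
  (PySem.Int.ofChars? res).getD 0

-- ===== PORT B =====
def newIntegerAltLoop : Nat → Int → Int → Int → Int
  | 0, _, res, _ => res
  | fuel + 1, n, res, base =>
    if n = 0 then res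
    else newIntegerAltLoop fuel (PySem.Int.floordiv n 9) (res + PySem.Int.mod n 9 * base) (base * 10)

def newInteger_alt (n : Int) : Int := newIntegerAltLoop (n.natAbs + 1) n 0 1

-- ===== PRECONDITION & SPEC =====
-- Pre_ excludes negative n, on which Python A's while-loop never terminates (n // 9 stays -1).
def Pre_newInteger (n : Int) : Prop := 0 ≤ n
instance (n : Int) : Decidable (Pre_newInteger n) := by unfold Pre_newInteger; infer_instance
def pvWitness_newInteger : Int := (5)

def Spec_newInteger (n : Int) (out : Int) : Prop := out = newInteger_alt n
instance (n : Int) (out : Int) : Decidable (Spec_newInteger n out) := by unfold Spec_newInteger; infer_instance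

-- ===== CLAIM (what is proved, stated in full; the proofs are below) =====
def Claim_equal_newInteger : Prop := ∀ (n : Int), Dom_newInteger n → Pre_newInteger n → Spec_newInteger n (newInteger n)

-- ===== LEMMAS AND PROOFS =====

-- `int(s)`'s digit scanner inside PySem.Int.ofChars? is a private definition; `shapeOfChars?`
-- mirrors ofChars? with the scanner abstracted, and `captureOfChars?` pins it down by unification.
def shapeOfChars? (g : List Char → Bool → Nat → Option Nat) (s : List Char) : Option Int :=
  have cs := (List.dropWhile PySem.Int.isIntSpace (List.dropWhile PySem.Int.isIntSpace s).reverse).reverse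
  match cs with
  | '-' :: ds => Option.map (fun n => -n) do
      let a ← (match ds with | [] => none | cs => g cs false 0)
      pure (a : Int)
  | '+' :: ds => Option.map (fun n => n) do
      let a ← (match ds with | [] => none | cs => g cs false 0)
      pure (a : Int)
  | ds => Option.map (fun n => n) do
      let a ← (match ds with | [] => none | cs => g cs false 0)
      pure (a : Int)

theorem captureOfChars? : ∃ g : List Char → Bool → Nat → Option Nat,
    (∀ s, PySem.Int.ofChars? s = shapeOfChars? g s) ∧
    (∀ b a, g [] b a = if b then some a else none) ∧
    (∀ c r b a, g (c :: r) b a =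
      if c.isDigit then g r true (a * 10 + (c.toNat - '0'.toNat))
      else if c = '_' ∧ b = true then
        (match r with | d :: _ => if d.isDigit then g r false a else none | [] => none)
      else none) :=
  ⟨_, fun _ => rfl, fun b a => by cases b <;> rfl, fun _ _ _ _ => rfl⟩

-- numeric value of a digit-char list, most significant first
def digitsNatVal (cs : List Char) (a : Nat) : Nat :=
  cs.foldl (fun a c => a * 10 + (c.toNat - '0'.toNat)) a

theorem digit_not_space (c : Char) (h : c.isDigit = true) : PySem.Int.isIntSpace c = false := by
  simp only [Char.isDigit, decide_eq_true_eq, Bool.and_eq_true] at h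
  simp only [PySem.Int.isIntSpace, Bool.or_eq_false_iff, decide_eq_false_iff_not]
  refine ⟨⟨⟨⟨⟨?_, ?_⟩, ?_⟩, ?_⟩, ?_⟩, ?_⟩ <;> rintro rfl <;> simp_all

theorem dropWhile_space_digits (cs : List Char) (hd : ∀ c ∈ cs, c.isDigit = true) :
    List.dropWhile PySem.Int.isIntSpace cs = cs := by
  cases cs with
  | nil => rfl
  | cons c t =>
    rw [List.dropWhile_cons, digit_not_space c (hd c List.mem_cons_self)]
    simp

theorem parse_digit_chars (cs : List Char) (hne : cs ≠ []) (hd : ∀ c ∈ cs, c.isDigit = true) :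
    PySem.Int.ofChars? cs = some ((digitsNatVal cs 0 : Nat) : Int) := by
  obtain ⟨g, hg1, hg2, hg3⟩ := captureOfChars?
  have gEval : ∀ (ds : List Char) (a : Nat), (∀ c ∈ ds, c.isDigit = true) →
      g ds true a = some (digitsNatVal ds a) := by
    intro ds
    induction ds with
    | nil => intro a _; rw [hg2]; rfl
    | cons c t ih =>
      intro a hall
      rw [hg3, if_pos (hall c List.mem_cons_self)]
      exact ih _ (fun x hx => hall x (List.mem_cons_of_mem c hx))
  rw [hg1]
  unfold shapeOfChars?
  have hrev : ∀ c ∈ cs.reverse, c.isDigit = true := fun c hc => hd c (List.mem_reverse.mp hc)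
  rw [dropWhile_space_digits cs hd, dropWhile_space_digits cs.reverse hrev, List.reverse_reverse]
  obtain ⟨c, t, rfl⟩ := List.exists_cons_of_ne_nil hne
  dsimp only
  split
  case _ ds heq =>
    rw [List.cons.injEq] at heq
    obtain ⟨rfl, rfl⟩ := heq
    exact absurd (hd '-' List.mem_cons_self) (by decide)
  case _ ds heq =>
    rw [List.cons.injEq] at heq
    obtain ⟨rfl, rfl⟩ := heq
    exact absurd (hd '+' List.mem_cons_self) (by decide)
  case _ h1 h2 =>
    show Option.map (fun n => n) ((g (c :: t) false 0).bind fun a => some (a : Int)) = _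
    rw [hg3, if_pos (hd c List.mem_cons_self)]
    rw [gEval t _ (fun x hx => hd x (List.mem_cons_of_mem c hx))]
    rfl

theorem digit_toChars (d : Int) (h0 : 0 ≤ d) (h9 : d < 9) :
    PySem.Int.toChars d = [Char.ofNat (48 + d.toNat)] := by
  interval_cases d <;> decide

-- every entry of A's digit list is in [0, 9)
theorem newIntegerDigits_bounds (fuel : Nat) (n : Int) :
    ∀ d ∈ newIntegerDigits fuel n, 0 ≤ d ∧ d < 9 := by
  induction fuel generalizing n with
  | zero => intro d hd; simp [newIntegerDigits] at hd
  | succ f ih =>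
    intro d hd
    simp only [newIntegerDigits] at hd
    split at hd
    · rw [List.mem_singleton] at hd
      subst hd
      exact ⟨PySem.Int.mod_nonneg n (by norm_num), PySem.Int.mod_lt n (by norm_num)⟩
    · rcases List.mem_cons.mp hd with h | h
      · subst h
        exact ⟨PySem.Int.mod_nonneg n (by norm_num), PySem.Int.mod_lt n (by norm_num)⟩
      · exact ih _ d h

theorem newIntegerDigits_ne_nil (fuel : Nat) (n : Int) :
    newIntegerDigits (fuel + 1) n ≠ [] := by
  simp only [newIntegerDigits]
  split <;> simp

-- B's loop computes res + base * (digit list evaluated LSB-first in base 10)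
def digitsIntVal : List Int → Int
  | [] => 0
  | d :: ds => d + 10 * digitsIntVal ds

theorem altLoop_eval (fuel : Nat) :
    ∀ (n res base : Int), 0 ≤ n → n.natAbs < fuel →
      newIntegerAltLoop fuel n res base = res + base * digitsIntVal (newIntegerDigits fuel n) := by
  induction fuel with
  | zero => intro n res base _ h; omega
  | succ f ih =>
    intro n res base hn hf
    have h9 : PySem.Int.floordiv n 9 = n / 9 := PySem.Int.floordiv_eq_ediv_of_pos (by norm_num)
    by_cases hz : n = 0
    · subst hz
      simp [newIntegerAltLoop, newIntegerDigits, digitsIntVal, PySem.Int.floordiv, PySem.Int.mod]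
    · rw [newIntegerAltLoop, if_neg hz, newIntegerDigits]
      by_cases ht : PySem.Int.floordiv n 9 = 0
      · -- 1 ≤ n ≤ 8: one more digit, then the loop sees 0 and stops
        rw [if_pos ht]
        have hn8 : n < 9 := by rw [h9] at ht; omega
        have hf1 : (0 : Int).natAbs < f := by omega
        rw [ht, ih 0 _ _ (le_refl 0) hf1]
        have hd0 : newIntegerDigits f 0 = [0] := by
          cases f with
          | zero => omega
          | succ f' => simp [newIntegerDigits, PySem.Int.floordiv, PySem.Int.mod]
        rw [hd0]
        simp [digitsIntVal]
        ring
      · rw [if_neg ht]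
        have htn : 0 ≤ n / 9 := Int.ediv_nonneg hn (by norm_num)
        have htlt : n / 9 < n := by
          rw [h9] at ht
          omega
        rw [ih (PySem.Int.floordiv n 9) _ _ (h9 ▸ htn) (by rw [h9]; omega)]
        rw [digitsIntVal]
        ring

theorem toChars_digit_isDigit (d : Int) (h0 : 0 ≤ d) (h9 : d < 9) :
    ∀ c ∈ PySem.Int.toChars d, c.isDigit = true := by
  rw [digit_toChars d h0 h9]
  intro c hc
  rw [List.mem_singleton] at hc
  subst hc
  interval_cases d <;> decide

theorem digitsNatVal_toChars_append (d : Int) (h0 : 0 ≤ d) (h9 : d < 9)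
    (rest : List Char) (a : Nat) :
    digitsNatVal (PySem.Int.toChars d ++ rest) a = digitsNatVal rest (a * 10 + d.toNat) := by
  interval_cases d <;> · show digitsNatVal (_ :: rest) a = _
                         rw [digitsNatVal, digitsNatVal, List.foldl_cons]
                         congr 1

-- the digit-char concatenation parses to the Horner fold of the digits themselves
theorem digitsNatVal_flatMap (b : List Int) (hb : ∀ d ∈ b, 0 ≤ d ∧ d < 9) (a : Nat) :
    digitsNatVal (b.flatMap PySem.Int.toChars) a
      = b.foldl (fun a d => a * 10 + d.toNat) a := by
  induction b generalizing a with
  | nil => rfl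
  | cons d t ih =>
    rw [List.flatMap_cons]
    obtain ⟨h0, h9⟩ := hb d List.mem_cons_self
    rw [digitsNatVal_toChars_append d h0 h9]
    exact ih (fun x hx => hb x (List.mem_cons_of_mem d hx)) _

theorem cast_horner_fold (b : List Int) (hb : ∀ d ∈ b, 0 ≤ d) (a : Nat) :
    ((b.foldl (fun a d => a * 10 + d.toNat) a : Nat) : Int)
      = b.foldl (fun (x : Int) d => x * 10 + d) (a : Int) := by
  induction b generalizing a with
  | nil => rfl
  | cons d t ih =>
    rw [List.foldl_cons, List.foldl_cons,
      ih (fun x hx => hb x (List.mem_cons_of_mem d hx))]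
    have := hb d List.mem_cons_self
    push_cast [Int.toNat_of_nonneg this]
    ring_nf

theorem horner_reverse (ds : List Int) :
    ds.reverse.foldl (fun (x : Int) d => x * 10 + d) 0 = digitsIntVal ds := by
  induction ds with
  | nil => rfl
  | cons d t ih =>
    rw [List.reverse_cons, List.foldl_append, ih, digitsIntVal]
    simp
    ring

theorem newInteger_spec' (n : Int) (h : 0 ≤ n) : newInteger n = newInteger_alt n := by
  unfold newInteger newInteger_alt
  dsimp only
  have hb := newIntegerDigits_bounds (n.natAbs + 1) n
  set ds := newIntegerDigits (n.natAbs + 1) n with hds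
  have hbr : ∀ d ∈ ds.reverse, 0 ≤ d ∧ d < 9 := fun d hd => hb d (List.mem_reverse.mp hd)
  -- the built string is the concatenation of the digit characters
  rw [PySem.List.foldl_append_eq_flatMap PySem.Int.toChars ds.reverse [], List.nil_append]
  have hne : ds.reverse.flatMap PySem.Int.toChars ≠ [] := by
    obtain ⟨d, t, hdt⟩ := List.exists_cons_of_ne_nil
      (List.reverse_ne_nil_iff.mpr (newIntegerDigits_ne_nil n.natAbs n))
    rw [hdt, List.flatMap_cons]
    obtain ⟨h0, h9⟩ := hbr d (hdt ▸ List.mem_cons_self)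
    rw [digit_toChars d h0 h9]
    simp
  have hdig : ∀ c ∈ ds.reverse.flatMap PySem.Int.toChars, c.isDigit = true := by
    intro c hc
    obtain ⟨d, hd, hcd⟩ := List.mem_flatMap.mp hc
    obtain ⟨h0, h9⟩ := hbr d hd
    exact toChars_digit_isDigit d h0 h9 c hcd
  rw [parse_digit_chars _ hne hdig]
  rw [digitsNatVal_flatMap ds.reverse hbr 0]
  rw [Option.getD_some]
  rw [cast_horner_fold ds.reverse (fun d hd => (hbr d hd).1) 0]
  rw [Int.natCast_zero, horner_reverse]
  rw [altLoop_eval (n.natAbs + 1) n 0 1 h (by omega)]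
  ring

-- ===== VERDICT (by name: the statement is the Claim_ definition above) =====
theorem newInteger_spec : Claim_equal_newInteger := by
  intro n _ hpre
  exact newInteger_spec' n hpre
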